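-- pv_equiv track=rewrite | github.com/marcosvsilva/cardiac-pathology | normalization/defs_normalization.py | move_last_position_class_recursive
-- ===== SOURCE A (Python) =====
-- def move_last_position_class_recursive(line, position):
--     if position == line.__len__() - 1:
--         return line
--     else:
--         aux = line[position]
--         line[position] = line[position + 1]
--         line[position + 1] = aux
--         return move_last_position_class_recursive(line, position + 1)
-- ===== SOURCE B (Python) =====
-- def move_last_position_class_recursive(line, position):
--     line.append(line.pop(position))
--     return line
-- ===== Notes on version B (the rewrite author's own statement) =====
-- stated objective: simpler
-- what changed: Replaces the recursive chain of adjacent swaps with a single pop of the element at the given index followed by an append, i.e. one in-place rotation instead of O(n) recursive swap steps.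
-- intended difference: For a negative position on a list of length >= 3, A's wrap-around adjacent swaps scramble the list (e.g. A([1,2,3],-1)=[2,1,3]) while B moves the element at that Python-negative index to the end (B([1,2,3],-1)=[1,2,3]), which is the function's intended purpose. — e.g. on move_last_position_class_recursive([1, 2, 3], -1): A returns [2, 1, 3], B returns [1, 2, 3]
-- outside the precondition, e.g. on move_last_position_class_recursive([], -1): A returns [], B raises IndexError
import Mathlib
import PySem

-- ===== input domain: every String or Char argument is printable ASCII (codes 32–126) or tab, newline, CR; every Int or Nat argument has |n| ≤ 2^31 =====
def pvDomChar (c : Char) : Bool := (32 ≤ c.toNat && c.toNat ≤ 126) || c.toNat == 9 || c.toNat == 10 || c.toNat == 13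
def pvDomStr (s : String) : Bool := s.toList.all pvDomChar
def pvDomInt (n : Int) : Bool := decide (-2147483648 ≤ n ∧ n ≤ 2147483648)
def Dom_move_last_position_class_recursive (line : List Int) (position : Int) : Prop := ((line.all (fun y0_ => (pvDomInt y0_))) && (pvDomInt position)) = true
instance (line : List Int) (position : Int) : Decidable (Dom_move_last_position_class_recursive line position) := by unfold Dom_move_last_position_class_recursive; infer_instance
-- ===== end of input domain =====

-- B moves the element at `position` to the end with one pop+append instead of A's recursive
-- chain of adjacent swaps; both Pythons mutate `line` in place, the equivalence proved here is
-- about the returned list value.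

-- ===== PORT A =====
-- literal port of A; where Python raises IndexError (pyGet? = none) the port returns []
-- (such inputs are outside Pre_)
def move_last_position_class_recursive (line : List Int) (position : Int) : List Int :=
  if position = (line.length : Int) - 1 then line
  else
    match h1 : PySem.List.pyGet? line position with
    | none => []
    | some aux =>
      match PySem.List.pyGet? line (position + 1) with
      | none => []
      | some b =>
        -- line[position] = line[position + 1]; line[position + 1] = aux
        move_last_position_class_recursive
          (PySem.List.pySetD (PySem.List.pySetD line position b) (position + 1) aux)
          (position + 1)
termination_by ((line.length : Int) - 1 - position).toNat
decreasing_by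
  simp only [PySem.List.length_pySetD]
  have hin : PySem.Raise.InRange line.length position := by
    by_contra hc
    rw [(PySem.List.pyGet?_eq_none_iff line position).mpr hc] at h1
    simp at h1
  obtain ⟨hlo, hhi⟩ := hin
  omega

-- ===== PORT B =====
-- literal port of B: line.append(line.pop(position)); return line
-- (pop? = none is Python's IndexError; such inputs are outside Pre_)
def move_last_position_class_recursive_alt (line : List Int) (position : Int) : List Int :=
  match PySem.List.pop? line position with
  | none => []
  | some (v, rest) => rest ++ [v]

-- ===== PRECONDITION & SPEC =====
-- Pre_ excludes exactly the inputs where at least one of the two Pythons raises IndexError: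
-- position outside Python's index range [-len, len).  In particular ([], -1) is excluded:
-- A returns [] there while B's pop from the empty list raises IndexError.
def Pre_move_last_position_class_recursive (line : List Int) (position : Int) : Prop :=
  -(line.length : Int) ≤ position ∧ position < (line.length : Int)
instance (line : List Int) (position : Int) : Decidable (Pre_move_last_position_class_recursive line position) := by unfold Pre_move_last_position_class_recursive; infer_instance

def pvWitness_move_last_position_class_recursive : List Int × Int := ([3, 1, 4, 1, 5], 1)

-- For a negative position on a list of length ≥ 3, A's wrap-around adjacent swaps scramble the
-- list (A [1,2,3] (-1) = [2,1,3]) while B moves the element at that Python-negative index to the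
-- end (B [1,2,3] (-1) = [1,2,3]), which is the function's intended purpose.
def D_move_last_position_class_recursive (line : List Int) (position : Int) : Prop :=
  position < 0 ∧ 3 ≤ line.length
instance (line : List Int) (position : Int) : Decidable (D_move_last_position_class_recursive line position) := by unfold D_move_last_position_class_recursive; infer_instance

def Spec_move_last_position_class_recursive (line : List Int) (position : Int) (out : List Int) : Prop := ¬ D_move_last_position_class_recursive line position → out = move_last_position_class_recursive_alt line position
instance (line : List Int) (position : Int) (out : List Int) : Decidable (Spec_move_last_position_class_recursive line position out) := by unfold Spec_move_last_position_class_recursive; infer_instance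

def pvDiffWitness_move_last_position_class_recursive : List Int × Int := ([1, 2, 3], -1)
def pvDiffWitnessOut_move_last_position_class_recursive : (List Int) × (List Int) := ([2, 1, 3], [1, 2, 3])

-- ===== CLAIM (what is proved, stated in full; the proofs are below) =====
def Claim_unchanged_move_last_position_class_recursive : Prop := ∀ (line : List Int) (position : Int), Dom_move_last_position_class_recursive line position → Pre_move_last_position_class_recursive line position → Spec_move_last_position_class_recursive line position (move_last_position_class_recursive line position)
def Claim_changed_move_last_position_class_recursive : Prop := Dom_move_last_position_class_recursive (pvDiffWitness_move_last_position_class_recursive.1) (pvDiffWitness_move_last_position_class_recursive.2) ∧ Pre_move_last_position_class_recursive (pvDiffWitness_move_last_position_class_recursive.1) (pvDiffWitness_move_last_position_class_recursive.2) ∧ D_move_last_position_class_recursive (pvDiffWitness_move_last_position_class_recursive.1) (pvDiffWitness_move_last_position_class_recursive.2) ∧ move_last_position_class_recursive (pvDiffWitness_move_last_position_class_recursive.1) (pvDiffWitness_move_last_position_class_recursive.2) = pvDiffWitnessOut_move_last_position_class_recursive.1 ∧ move_last_position_class_recursive_alt (pvDiffWitness_move_last_position_class_recursive.1) (pvDiffWitness_move_last_position_class_recursive.2)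 = pvDiffWitnessOut_move_last_position_class_recursive.2 ∧ pvDiffWitnessOut_move_last_position_class_recursive.1 ≠ pvDiffWitnessOut_move_last_position_class_recursive.2

-- ===== LEMMAS AND PROOFS =====

-- after swapping positions q and q+1, erasing index q+1 gives the same list as erasing index q
theorem pv_swap_eraseIdx (l : List Int) (q : Nat) (h : q + 1 < l.length) :
    ((l.set q (l[q + 1]'h)).set (q + 1) (l[q]'(by omega))).eraseIdx (q + 1) = l.eraseIdx q := by
  apply List.ext_getElem
  · simp only [List.length_eraseIdx, List.length_set]
    split_ifs <;> omega
  · intro i h1 h2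
    simp only [List.length_eraseIdx, List.length_set] at h1 h2
    simp only [List.getElem_eraseIdx, List.getElem_set]
    split_ifs <;> first | rfl | omega | (congr 1; omega)

-- a nonempty list is its last-element rotation at the last index
theorem pv_last_rotate (l : List Int) (hq : 0 < l.length) :
    l = l.eraseIdx (l.length - 1) ++ [l[l.length - 1]'(by omega)] := by
  apply List.ext_getElem
  · simp only [List.length_append, List.length_eraseIdx, List.length_singleton]
    split_ifs <;> omega
  · intro i h1 h2
    rcases Nat.lt_or_ge i (l.length - 1) with hi | hi
    · rw [List.getElem_append_left (by simp only [List.length_eraseIdx]; split_ifs <;> omega)]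
      simp only [List.getElem_eraseIdx]
      rw [dif_pos hi]
    · have : i = l.length - 1 := by omega
      subst this
      rw [List.getElem_append_right (by simp only [List.length_eraseIdx]; split_ifs <;> omega)]
      simp

-- A at a valid nonnegative index q computes the pop-and-append rotation
theorem pv_A_rotate : ∀ (k : Nat) (l : List Int) (q : Nat) (hq : q < l.length),
    l.length - 1 - q = k →
    move_last_position_class_recursive l (q : Int) = l.eraseIdx q ++ [l[q]'hq] := by
  intro k
  induction k with
  | zero =>
    intro l q hq hk
    have hq' : q = l.length - 1 := by omega
    rw [move_last_position_class_recursive, if_pos (by omega)]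
    subst hq'
    exact pv_last_rotate l (by omega)
  | succ k ih =>
    intro l q hq hk
    have hq1 : q + 1 < l.length := by omega
    rw [move_last_position_class_recursive, if_neg (by omega)]
    rw [PySem.List.pyGet?_ofNat l q hq]
    have hcast : (q : Int) + 1 = ((q + 1 : Nat) : Int) := by push_cast; ring
    rw [hcast, PySem.List.pyGet?_ofNat l (q + 1) hq1]
    simp only [PySem.List.pySetD_natCast]
    set l2 := (l.set q (l[q + 1]'hq1)).set (q + 1) (l[q]'hq) with hl2
    have hlen2 : l2.length = l.length := by simp [hl2]
    rw [ih l2 (q + 1) (by omega) (by omega)]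
    have hget : l2[q + 1]'(by omega) = l[q]'hq := by simp [hl2]
    rw [pv_swap_eraseIdx l q hq1, hget]

-- B at a valid nonnegative index q computes the same rotation
theorem pv_B_rotate (l : List Int) (q : Nat) (hq : q < l.length) :
    move_last_position_class_recursive_alt l (q : Int) = l.eraseIdx q ++ [l[q]'hq] := by
  unfold move_last_position_class_recursive_alt
  rw [PySem.List.pop?_natCast l q hq]

-- ===== VERDICT (by name: the statement is the Claim_ definition above) =====
theorem move_last_position_class_recursive_spec : Claim_unchanged_move_last_position_class_recursive := by
  intro line position _hdom hpre hnd
  obtain ⟨hlo, hhi⟩ := hpre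
  rcases Int.lt_or_le position 0 with hneg | hpos
  · -- negative position: ¬D_ forces length ≤ 2; finitely many shapes, computed directly
    have hlen : line.length ≤ 2 := by
      by_contra hc
      exact hnd ⟨hneg, by omega⟩
    have hlen1 : 1 ≤ line.length := by
      by_contra hc
      simp only [not_le, Nat.lt_one_iff] at hc
      rw [hc] at hlo hhi
      omega
    match line, hlen, hlen1 with
    | [a], _, _ =>
      have : position = -1 := by simp at hlo hhi; omega
      subst this
      simp [move_last_position_class_recursive, move_last_position_class_recursive_alt,
        PySem.List.pyGet?, PySem.List.pyIdx?, PySem.List.pop?, PySem.List.pySetD,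
        PySem.List.pySet?, List.getElem?_cons_zero]
    | [a, b], _, _ =>
      have : position = -1 ∨ position = -2 := by simp at hlo hhi; omega
      rcases this with h | h <;> subst h <;>
        simp [move_last_position_class_recursive, move_last_position_class_recursive_alt,
          PySem.List.pyGet?, PySem.List.pyIdx?, PySem.List.pop?, PySem.List.pySetD,
          PySem.List.pySet?, List.getElem?_cons_zero, List.getElem?_cons_succ]
  · -- nonnegative position: both are the rotation at q = position.toNat
    have hq : position.toNat < line.length := by omega
    have hcast : ((position.toNat : Nat) : Int) = position := Int.toNat_of_nonneg hpos
    rw [← hcast, pv_A_rotate (line.length - 1 - position.toNat) line position.toNat hq rfl,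
      pv_B_rotate line position.toNat hq]

theorem move_last_position_class_recursive_changed : Claim_changed_move_last_position_class_recursive := by
  unfold Claim_changed_move_last_position_class_recursive
  refine ⟨by decide, by decide, by decide, ?_, by decide, by decide⟩
  show move_last_position_class_recursive [1, 2, 3] (-1) = [2, 1, 3]
  simp [move_last_position_class_recursive,
    PySem.List.pyGet?, PySem.List.pyIdx?, PySem.List.pySetD, PySem.List.pySet?,
    List.getElem?_cons_zero]
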